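-- pv_equiv track=rewrite | github.com/riyuna/problem-solving | boj/21965.py | solve
-- ===== SOURCE A (Python) =====
-- def solve(L):
--     if len(L)<3:return True
--     changed=0
--     M=[]
--     for i in range(len(L)-1):
--         M.append(L[i+1]-L[i])
--         if M[-1]==0:return False
--         if len(M)>1 and (M[-1]*M[-2])<0:changed+=1
--     return changed<2
-- ===== SOURCE B (Python) =====
-- def solve(L):
--     if len(L) < 3:
--         return True
--
--     def is_mountain(xs, p):
--         return (all(xs[i] < xs[i + 1] for i in range(p))
--                 and all(xs[i + 1] < xs[i] for i in range(p, len(xs) - 1)))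
--
--     neg = [-x for x in L]
--     return is_mountain(L, L.index(max(L))) or is_mountain(neg, neg.index(max(neg)))
-- ===== Notes on version B (the rewrite author's own statement) =====
-- stated objective: alternative
-- what changed: Instead of A's single pass over consecutive differences that counts sign flips, B locates the extremum positions (index of max of L, and of max of the negated list) and verifies the sequence is a strict mountain or a strict valley around that single peak.
import Mathlib
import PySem

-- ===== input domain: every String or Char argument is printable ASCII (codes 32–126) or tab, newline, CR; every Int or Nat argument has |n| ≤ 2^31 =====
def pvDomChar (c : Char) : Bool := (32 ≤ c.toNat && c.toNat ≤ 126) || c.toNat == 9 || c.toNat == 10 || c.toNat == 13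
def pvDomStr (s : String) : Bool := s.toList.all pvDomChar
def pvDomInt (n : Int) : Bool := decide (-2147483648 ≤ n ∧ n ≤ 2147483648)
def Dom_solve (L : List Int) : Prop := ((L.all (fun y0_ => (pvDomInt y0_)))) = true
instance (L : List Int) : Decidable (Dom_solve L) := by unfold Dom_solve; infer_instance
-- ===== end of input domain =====

-- B replaces A's flip-counting pass over consecutive differences by an extremum-based shape
-- check: find the index of the maximum (and of the maximum of the negated list) and verify
-- the sequence is a strict mountain or a strict valley around it; objective: alternative.

-- ===== PORT A =====
-- the for-loop of A: remaining range, the list M, the counter changed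
def solveGo (L : List Int) : List Int → List Int → Int → Bool
  | [], _M, changed => decide (changed < 2)
  | i :: rest, M, changed =>
    let M' := M ++ [PySem.List.pyGetD L (i + 1) 0 - PySem.List.pyGetD L i 0]
    if PySem.List.pyGetD M' (-1) 0 = 0 then false
    else
      let changed' := if 1 < M'.length ∧ PySem.List.pyGetD M' (-1) 0 * PySem.List.pyGetD M' (-2) 0 < 0
        then changed + 1 else changed
      solveGo L rest M' changed'

def solve (L : List Int) : Bool :=
  if L.length < 3 then true
  else solveGo L (PySem.List.pyRange 0 ((L.length : Int) - 1) 1) [] 0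

-- ===== PORT B =====
-- is_mountain(xs, p): strictly rising before index p, strictly falling from p on
def isMountain (xs : List Int) (p : Int) : Bool :=
  ((PySem.List.pyRange 0 p 1).all fun i =>
      decide (PySem.List.pyGetD xs i 0 < PySem.List.pyGetD xs (i + 1) 0)) &&
  ((PySem.List.pyRange p ((xs.length : Int) - 1) 1).all fun i =>
      decide (PySem.List.pyGetD xs (i + 1) 0 < PySem.List.pyGetD xs i 0))

-- xs.index(max(xs)); the 0-defaults are unreachable here (solve_alt calls it with length ≥ 3)
def firstIdxOfMax (xs : List Int) : Int :=
  match PySem.List.max? xs (fun x => x) with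
  | none => 0
  | some m =>
    match PySem.List.index? xs m with
    | none => 0
    | some i => (i : Int)

def solve_alt (L : List Int) : Bool :=
  if L.length < 3 then true
  else
    let neg := L.map fun x => -x
    isMountain L (firstIdxOfMax L) || isMountain neg (firstIdxOfMax neg)

-- ===== PRECONDITION & SPEC =====
def Spec_solve (L : List Int) (out : Bool) : Prop := out = solve_alt L
instance (L : List Int) (out : Bool) : Decidable (Spec_solve L out) := by unfold Spec_solve; infer_instance

-- ===== CLAIM (what is proved, stated in full; the proofs are below) =====
def Claim_equal_solve : Prop := ∀ (L : List Int), Dom_solve L → Spec_solve L (solve L)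

-- ===== LEMMAS AND PROOFS =====

-- "strict mountain with peak at p": rising strictly before p, falling strictly from p on
def Up (xs : List Int) (p : Nat) : Prop :=
  ∀ i : Nat, i + 1 < xs.length →
    (i < p → xs.getD i 0 < xs.getD (i + 1) 0) ∧ (p ≤ i → xs.getD (i + 1) 0 < xs.getD i 0)

-- A's loop seen over the difference list, carrying the previous difference
def core : List Int → Option Int → Int → Bool
  | [], _, c => decide (c < 2)
  | d :: ds, p, c =>
    if d = 0 then false
    else core ds (some d)
      (match p with
       | some q => if d * q < 0 then c + 1 else c
       | none => c)

def flips : Bool → List Bool → Nat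
  | _, [] => 0
  | s, t :: ts => (if t = s then 0 else 1) + flips t ts

theorem sign_mul_neg (d q : Int) (hd : d ≠ 0) (hq : q ≠ 0) :
    (d * q < 0) ↔ ¬ (decide (0 < d) = decide (0 < q)) := by
  rcases lt_trichotomy d 0 with h1 | h1 | h1 <;>
  rcases lt_trichotomy q 0 with h2 | h2 | h2 <;>
  simp_all [mul_neg_iff] <;> omega

theorem core_some (D : List Int) : ∀ (q : Int) (c : Int), q ≠ 0 →
    core D (some q) c =
      if D.any (fun d => d = 0) then false
      else decide (c + (flips (decide (0 < q)) (D.map (fun d => decide (0 < d))) : Int) < 2) := by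
  induction D with
  | nil => intro q c hq; simp [core, flips]
  | cons d ds ih =>
    intro q c hq
    by_cases hd : d = 0
    · simp [core, hd]
    · simp only [core, if_neg hd, List.any_cons, List.map_cons, flips]
      rw [ih d _ hd]
      have hdo : (decide (d = 0) || ds.any fun d => decide (d = 0)) = (ds.any fun d => decide (d = 0)) := by
        simp [hd]
      rw [hdo]
      by_cases hz : (ds.any fun d => decide (d = 0)) = true
      · simp [hz]
      · simp only [hz, if_false, Bool.false_eq_true]
        have hsign := sign_mul_neg d q hd hq
        rw [decide_eq_decide]
        split_ifs with h1 h2 h3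
        · exact (hsign.mp h1 h2).elim
        · push_cast; omega
        · push_cast; omega
        · exact (h1 (hsign.mpr h3)).elim

theorem diffs_length (L : List Int) :
    (List.zipWith (fun a b => b - a) L L.tail).length = L.length - 1 := by
  simp [List.length_zipWith]

theorem diffs_getElem (L : List Int) (j : Nat) (h : j + 1 < L.length) :
    (List.zipWith (fun a b => b - a) L L.tail)[j]'(by rw [diffs_length]; omega) =
      L[j + 1]'h - L[j]'(by omega) := by
  rw [List.getElem_zipWith]
  congr 1
  rw [List.getElem_tail]

theorem go_eq_core (L : List Int) :
    ∀ (k j : Nat) (c : Int), j + k + 1 = L.length →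
    solveGo L (PySem.List.pyRange (j : Int) ((L.length : Int) - 1) 1)
      ((List.zipWith (fun a b => b - a) L L.tail).take j) c
    = core ((List.zipWith (fun a b => b - a) L L.tail).drop j)
        (((List.zipWith (fun a b => b - a) L L.tail).take j).getLast?) c := by
  set D := List.zipWith (fun a b => b - a) L L.tail with hD
  have hlen : D.length = L.length - 1 := diffs_length L
  intro k
  induction k with
  | zero =>
    intro j c hj
    rw [PySem.List.pyRange_one_eq_nil (by omega)]
    rw [List.drop_eq_nil_of_le (by omega)]
    simp [solveGo, core]
  | succ k ih =>
    intro j c hj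
    have hjD : j < D.length := by omega
    rw [PySem.List.pyRange_one_cons (by omega)]
    simp only [solveGo]
    have hget1 : PySem.List.pyGetD L ((j : Int) + 1) 0 = L[j + 1]'(by omega) := by
      rw [show ((j : Int) + 1) = ((j + 1 : Nat) : Int) by push_cast; ring,
        PySem.List.pyGetD_natCast, List.getD_eq_getElem]
    have hget0 : PySem.List.pyGetD L (j : Int) 0 = L[j]'(by omega) := by
      rw [PySem.List.pyGetD_natCast, List.getD_eq_getElem]
    have hdj : L[j + 1]'(by omega) - L[j]'(by omega) = D[j]'hjD := (diffs_getElem L j (by omega)).symm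
    have hM' : D.take j ++ [PySem.List.pyGetD L ((j : Int) + 1) 0 - PySem.List.pyGetD L (j : Int) 0]
        = D.take (j + 1) := by
      rw [hget1, hget0, hdj, List.take_add_one, List.getElem?_eq_getElem hjD]
      rfl
    rw [hM']
    have hlast : PySem.List.pyGetD (D.take (j + 1)) (-1) 0 = D[j]'hjD := by
      rw [← hM', hget1, hget0, hdj]
      exact PySem.List.pyGetD_neg_one_append_singleton _ _ _
    have hdrop : D.drop j = D[j]'hjD :: D.drop (j + 1) := List.drop_eq_getElem_cons hjD
    rw [hlast, hdrop]
    simp only [core]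
    by_cases hz : D[j]'hjD = 0
    · simp [hz]
    · rw [if_neg hz, if_neg hz]
      have hlen' : (D.take (j + 1)).length = j + 1 := by
        rw [List.length_take]; omega
      have hlastlast : (D.take (j + 1)).getLast? = some (D[j]'hjD) := by
        rw [← hM', hget1, hget0, hdj]
        exact List.getLast?_concat
      rw [show ((j : Int) + 1) = ((j + 1 : Nat) : Int) by push_cast; ring]
      by_cases hj0 : j = 0
      · subst hj0
        rw [if_neg (by rw [hlen']; rintro ⟨h1, -⟩; omega)]
        rw [ih 1 _ (by omega), hlastlast]
        simp
      · obtain ⟨j', rfl⟩ : ∃ j', j = j' + 1 := ⟨j - 1, by omega⟩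
        have hj'D : j' < D.length := by omega
        have hprev : ((D.take (j' + 1)).getLast?) = some (D[j']'hj'D) := by
          rw [List.take_add_one, List.getElem?_eq_getElem hj'D]
          exact List.getLast?_concat
        have hm2 : PySem.List.pyGetD (D.take (j' + 1 + 1)) (-2) 0 = D[j']'hj'D := by
          rw [PySem.List.pyGetD_neg_ofNat _ 2 0 (by omega) (by rw [hlen']; omega)]
          have h3 : (D.take (j' + 1 + 1)).length - 2 = j' := by rw [hlen']; omega
          rw [List.getElem_take]
          simp only [h3]
        rw [hm2, hprev]
        have hred : (match some (D[j']'hj'D) with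
            | some q => if (D[j' + 1]'hjD) * q < 0 then c + 1 else c
            | none => c) = if (D[j' + 1]'hjD) * (D[j']'hj'D) < 0 then c + 1 else c := rfl
        rw [hred]
        by_cases hlt : (D[j' + 1]'hjD) * (D[j']'hj'D) < 0
        · rw [if_pos ⟨by rw [hlen']; omega, hlt⟩, if_pos hlt, ih (j' + 1 + 1) _ (by omega), hlastlast]
        · rw [if_neg (fun h => hlt h.2), if_neg hlt, ih (j' + 1 + 1) _ (by omega), hlastlast]

-- ## combinatorics of the sign list
theorem flips_zero (ts : List Bool) : ∀ s, flips s ts = 0 → ∀ x ∈ ts, x = s := by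
  induction ts with
  | nil => intro s _ x hx; exact absurd hx List.not_mem_nil
  | cons t ts ih =>
    intro s h x hx
    have hts : t = s := by by_contra hne; simp [flips, hne] at h
    subst hts
    have h0 : flips t ts = 0 := by simpa [flips] using h
    rcases List.mem_cons.mp hx with hx | hx
    · exact hx
    · exact ih t h0 x hx

theorem flips_le_one (ss : List Bool) : ∀ s, flips s ss ≤ 1 →
    ∃ a b, s :: ss = List.replicate a s ++ List.replicate b (!s) := by
  induction ss with
  | nil => exact fun s _ => ⟨1, 0, rfl⟩
  | cons t ts ih =>
    intro s h
    by_cases hts : t = s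
    · subst hts
      have h' : flips t ts ≤ 1 := by simpa [flips] using h
      obtain ⟨a, b, hab⟩ := ih t h'
      exact ⟨a + 1, b, by rw [List.replicate_succ, List.cons_append, ← hab]⟩
    · have h0 : flips t ts = 0 := by
        have h' := h
        simp only [flips, if_neg hts] at h'
        omega
      have ht : t = !s := by revert hts; cases s <;> cases t <;> simp
      have hrep : ts = List.replicate ts.length t := List.eq_replicate_length.mpr (flips_zero ts t h0)
      refine ⟨1, ts.length + 1, ?_⟩
      calc s :: t :: ts = s :: t :: List.replicate ts.length t := by rw [← hrep]
        _ = List.replicate 1 s ++ List.replicate (ts.length + 1) (!s) := by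
              rw [List.replicate_succ, ht]; rfl

theorem flips_replicate_same (s : Bool) (ts : List Bool) :
    ∀ k, flips s (List.replicate k s ++ ts) = flips s ts := by
  intro k
  induction k with
  | zero => rfl
  | succ k ih => simp [List.replicate_succ, flips, ih]

theorem flips_replicate_self (s : Bool) (k : Nat) : flips s (List.replicate k s) = 0 := by
  have h := flips_replicate_same s [] k
  simpa [flips] using h

theorem flips_pattern_le_one (s : Bool) (a b : Nat) :
    (match (List.replicate a s ++ List.replicate b (!s) : List Bool) with
     | [] => 0
     | t :: ts => flips t ts) ≤ 1 := by
  cases a with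
  | zero =>
    cases b with
    | zero => simp
    | succ b =>
      simp only [List.replicate_succ]
      exact le_trans (le_of_eq (flips_replicate_self (!s) b)) (by omega)
  | succ a =>
    simp only [List.replicate_succ, List.cons_append]
    rw [flips_replicate_same]
    cases b with
    | zero => simp [flips]
    | succ b =>
      simp only [List.replicate_succ, flips]
      rw [flips_replicate_self]
      cases s <;> simp

theorem getElem_repl_append (x y : Bool) (a b i : Nat) (h : i < a + b) :
    (List.replicate a x ++ List.replicate b y)[i]'(by simp; omega) = if i < a then x else y := by
  by_cases hi : i < a
  · rw [List.getElem_append_left (by simpa using hi), List.getElem_replicate, if_pos hi]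
  · rw [List.getElem_append_right (by simpa using hi), List.getElem_replicate, if_neg hi]

theorem getD_repl_append (x y : Bool) (a b i : Nat) (h : i < a + b) :
    (List.replicate a x ++ List.replicate b y).getD i false = if i < a then x else y := by
  rw [List.getD_eq_getElem _ _ (by simp; omega)]
  exact getElem_repl_append x y a b i h

theorem diffs_getD (L : List Int) (j : Nat) (h : j + 1 < L.length) :
    (List.zipWith (fun a b => b - a) L L.tail).getD j 0 = L.getD (j + 1) 0 - L.getD j 0 := by
  rw [List.getD_eq_getElem _ _ (by rw [diffs_length]; omega),
    List.getD_eq_getElem _ _ h, List.getD_eq_getElem _ _ (by omega : j < L.length)]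
  exact diffs_getElem L j h

theorem getD_map_neg (l : List Int) (n : Nat) :
    (l.map fun x => -x).getD n 0 = -(l.getD n 0) := by
  simpa using List.getD_map l 0 (fun x => -x) (n := n)

-- A = true ↔ no zero difference and at most one sign flip, stated through core
theorem solve_eq_core (L : List Int) (h3 : ¬ L.length < 3) :
    solve L = core (List.zipWith (fun a b => b - a) L L.tail) none 0 := by
  unfold solve
  rw [if_neg h3]
  have h := go_eq_core L (L.length - 1) 0 0 (by omega)
  simpa using h

-- A = true ↔ no zero difference and the sign list is one block of s then one block of !s
theorem A_char (L : List Int) (h3 : ¬ L.length < 3) :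
    solve L = true ↔
      ((∀ i, i < (List.zipWith (fun a b => b - a) L L.tail).length →
          (List.zipWith (fun a b => b - a) L L.tail).getD i 0 ≠ 0) ∧
       ∃ (s : Bool) (a b : Nat),
         (List.zipWith (fun a b => b - a) L L.tail).map (fun d => decide (0 < d)) =
           List.replicate a s ++ List.replicate b (!s)) := by
  have hlen : (List.zipWith (fun a b => b - a) L L.tail).length = L.length - 1 := diffs_length L
  obtain ⟨d, ds, hDc⟩ : ∃ d ds, List.zipWith (fun a b => b - a) L L.tail = d :: ds := by
    cases h : List.zipWith (fun a b => b - a) L L.tail with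
    | nil => rw [h] at hlen; simp at hlen; omega
    | cons d ds => exact ⟨d, ds, rfl⟩
  rw [solve_eq_core L h3, hDc]
  simp only [core]
  by_cases hd : d = 0
  · rw [if_pos hd]
    constructor
    · intro h; exact absurd h (by simp)
    · rintro ⟨hnz, -⟩
      exact absurd hd (by simpa using hnz 0 (by simp))
  · rw [if_neg hd, core_some ds d 0 hd]
    by_cases hz : (ds.any fun x => decide (x = 0)) = true
    · simp only [hz, if_true]
      constructor
      · intro h; exact absurd h (by simp)
      · rintro ⟨hnz, -⟩
        obtain ⟨x, hxmem, hx0⟩ := List.any_eq_true.mp hz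
        obtain ⟨j, hj, hxj⟩ := List.mem_iff_getElem.mp hxmem
        have hgd : ds.getD j 0 = x := by rw [List.getD_eq_getElem _ _ hj]; exact hxj
        have hne := hnz (j + 1) (by simp only [List.length_cons]; omega)
        rw [List.getD_cons_succ, hgd] at hne
        exact absurd (of_decide_eq_true hx0) hne
    · simp only [hz, if_false, Bool.false_eq_true]
      constructor
      · intro h
        have hle : flips (decide (0 < d)) (ds.map fun x => decide (0 < x)) ≤ 1 := by
          have := of_decide_eq_true h
          omega
        obtain ⟨a, b, hab⟩ := flips_le_one _ _ hle
        refine ⟨?_, decide (0 < d), a, b, by rw [List.map_cons, hab]⟩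
        intro i hi
        cases i with
        | zero => rw [List.getD_cons_zero]; exact hd
        | succ j =>
          rw [List.getD_cons_succ]
          intro hj0
          have hjlt : j < ds.length := by simp only [List.length_cons] at hi; omega
          have hmem : ds.getD j 0 ∈ ds := by
            rw [List.getD_eq_getElem _ _ hjlt]; exact List.getElem_mem hjlt
          exact hz (List.any_eq_true.mpr ⟨ds.getD j 0, hmem, by simpa using hj0⟩)
      · rintro ⟨-, s, a, b, hpat⟩
        rw [List.map_cons] at hpat
        have hle := flips_pattern_le_one s a b
        rw [← hpat] at hle
        simp only at hle
        refine decide_eq_true ?_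
        omega

-- the sign-block characterization ↔ strict mountain or strict valley
theorem A_iff (L : List Int) (h3 : ¬ L.length < 3) :
    solve L = true ↔
      ((∃ p, p ≤ L.length - 1 ∧ Up L p) ∨ (∃ p, p ≤ L.length - 1 ∧ Up (L.map fun x => -x) p)) := by
  have hlen : (List.zipWith (fun a b => b - a) L L.tail).length = L.length - 1 := diffs_length L
  have hmapD : ∀ i : Nat,
      ((List.zipWith (fun a b => b - a) L L.tail).map (fun d => decide (0 < d))).getD i false =
        decide (0 < (List.zipWith (fun a b => b - a) L L.tail).getD i 0) := by
    intro i
    simpa using List.getD_map (List.zipWith (fun a b => b - a) L L.tail) 0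
      (fun d => decide (0 < d)) (n := i)
  rw [A_char L h3]
  constructor
  · rintro ⟨hnz, s, a, b, hpat⟩
    have hab : a + b = L.length - 1 := by
      have := congrArg List.length hpat
      simp only [List.length_map, List.length_append, List.length_replicate] at this
      omega
    have hsg : ∀ i, i < (List.zipWith (fun a b => b - a) L L.tail).length →
        decide (0 < (List.zipWith (fun a b => b - a) L L.tail).getD i 0) = if i < a then s else !s := by
      intro i hi
      rw [← hmapD i, hpat, getD_repl_append s (!s) a b i (by omega)]
    cases s with
    | true =>
      refine Or.inl ⟨a, by omega, ?_⟩
      intro i h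
      have hiD : i < (List.zipWith (fun a b => b - a) L L.tail).length := by omega
      have hgot := diffs_getD L i h
      have hs := hsg i hiD
      have hz := hnz i hiD
      constructor
      · intro hia
        rw [if_pos hia] at hs
        have := of_decide_eq_true hs
        omega
      · intro hia
        rw [if_neg (by omega)] at hs
        have : ¬ (0 < (List.zipWith (fun a b => b - a) L L.tail).getD i 0) := of_decide_eq_false hs
        omega
    | false =>
      refine Or.inr ⟨a, by omega, ?_⟩
      intro i h
      rw [List.length_map] at h
      have hiD : i < (List.zipWith (fun a b => b - a) L L.tail).length := by omega
      have hgot := diffs_getD L i h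
      have hs := hsg i hiD
      have hz := hnz i hiD
      rw [getD_map_neg, getD_map_neg]
      constructor
      · intro hia
        rw [if_pos hia] at hs
        have : ¬ (0 < (List.zipWith (fun a b => b - a) L L.tail).getD i 0) := of_decide_eq_false hs
        omega
      · intro hia
        rw [if_neg (by omega)] at hs
        have := of_decide_eq_true hs
        omega
  · rintro (⟨p, hp, hup⟩ | ⟨p, hp, hup⟩)
    · have hkey : ∀ i, i < (List.zipWith (fun a b => b - a) L L.tail).length →
          (List.zipWith (fun a b => b - a) L L.tail).getD i 0 ≠ 0 ∧
          decide (0 < (List.zipWith (fun a b => b - a) L L.tail).getD i 0) =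
            (if i < p then true else false) := by
        intro i hi
        have h1 : i + 1 < L.length := by omega
        have hgot := diffs_getD L i h1
        rcases Nat.lt_or_ge i p with hip | hip
        · have hlt := (hup i h1).1 hip
          rw [if_pos hip]
          exact ⟨by omega, decide_eq_true (by omega)⟩
        · have hlt := (hup i h1).2 hip
          rw [if_neg (by omega)]
          exact ⟨by omega, decide_eq_false (by omega)⟩
      refine ⟨fun i hi => (hkey i hi).1, true, p, L.length - 1 - p, ?_⟩
      apply List.ext_getElem
      · simp only [List.length_map, List.length_append, List.length_replicate]
        omega
      · intro i hi1 hi2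
        have hiD : i < (List.zipWith (fun a b => b - a) L L.tail).length := by simpa using hi1
        rw [← List.getD_eq_getElem _ false hi1, ← List.getD_eq_getElem _ false hi2,
          hmapD i, getD_repl_append true (!true) p (L.length - 1 - p) i (by
            simp only [List.length_append, List.length_replicate] at hi2; omega)]
        have := (hkey i hiD).2
        simpa using this
    · have hkey : ∀ i, i < (List.zipWith (fun a b => b - a) L L.tail).length →
          (List.zipWith (fun a b => b - a) L L.tail).getD i 0 ≠ 0 ∧
          decide (0 < (List.zipWith (fun a b => b - a) L L.tail).getD i 0) =
            (if i < p then false else true) := by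
        intro i hi
        have h1 : i + 1 < L.length := by omega
        have h1' : i + 1 < (L.map fun x => -x).length := by rw [List.length_map]; omega
        have hgot := diffs_getD L i h1
        have hu := hup i h1'
        rw [getD_map_neg, getD_map_neg] at hu
        rcases Nat.lt_or_ge i p with hip | hip
        · have hlt := hu.1 hip
          rw [if_pos hip]
          exact ⟨by omega, decide_eq_false (by omega)⟩
        · have hlt := hu.2 hip
          rw [if_neg (by omega)]
          exact ⟨by omega, decide_eq_true (by omega)⟩
      refine ⟨fun i hi => (hkey i hi).1, false, p, L.length - 1 - p, ?_⟩
      apply List.ext_getElem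
      · simp only [List.length_map, List.length_append, List.length_replicate]
        omega
      · intro i hi1 hi2
        have hiD : i < (List.zipWith (fun a b => b - a) L L.tail).length := by simpa using hi1
        rw [← List.getD_eq_getElem _ false hi1, ← List.getD_eq_getElem _ false hi2,
          hmapD i, getD_repl_append false (!false) p (L.length - 1 - p) i (by
            simp only [List.length_append, List.length_replicate] at hi2; omega)]
        have := (hkey i hiD).2
        simpa using this

-- ## B-side
theorem isMountain_iff (xs : List Int) (p : Nat) (hp : p ≤ xs.length - 1) (h1 : 1 ≤ xs.length) :
    isMountain xs (p : Int) = true ↔ Up xs p := by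
  unfold isMountain
  rw [Bool.and_eq_true, List.all_eq_true, List.all_eq_true]
  have hcast : ∀ i : Nat, ((i : Int) + 1) = ((i + 1 : Nat) : Int) := by intro i; push_cast; ring
  constructor
  · rintro ⟨hA, hB⟩ i hi
    constructor
    · intro hip
      have := hA (i : Int) (PySem.List.mem_pyRange_one.mpr ⟨by omega, by exact_mod_cast hip⟩)
      rw [hcast i, PySem.List.pyGetD_natCast, PySem.List.pyGetD_natCast] at this
      exact of_decide_eq_true this
    · intro hip
      have := hB (i : Int) (PySem.List.mem_pyRange_one.mpr ⟨by exact_mod_cast hip, by omega⟩)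
      rw [hcast i, PySem.List.pyGetD_natCast, PySem.List.pyGetD_natCast] at this
      exact of_decide_eq_true this
  · intro hup
    constructor
    · intro j hj
      obtain ⟨hj0, hjp⟩ := PySem.List.mem_pyRange_one.mp hj
      obtain ⟨i, rfl⟩ : ∃ i : Nat, j = (i : Int) := ⟨j.toNat, (Int.toNat_of_nonneg hj0).symm⟩
      have hip : i < p := by exact_mod_cast hjp
      have hi : i + 1 < xs.length := by omega
      rw [hcast i, PySem.List.pyGetD_natCast, PySem.List.pyGetD_natCast]
      exact decide_eq_true ((hup i hi).1 hip)
    · intro j hj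
      obtain ⟨hj0, hjn⟩ := PySem.List.mem_pyRange_one.mp hj
      obtain ⟨i, rfl⟩ : ∃ i : Nat, j = (i : Int) := ⟨j.toNat, (Int.toNat_of_nonneg (by omega)).symm⟩
      have hip : p ≤ i := by exact_mod_cast hj0
      have hi : i + 1 < xs.length := by
        have : (i : Int) < (xs.length : Int) - 1 := hjn
        omega
      rw [hcast i, PySem.List.pyGetD_natCast, PySem.List.pyGetD_natCast]
      exact decide_eq_true ((hup i hi).2 hip)

theorem up_chain (xs : List Int) (p : Nat) (h : Up xs p) :
    ∀ k, k < xs.length → ∀ j, j < k → k ≤ p → xs.getD j 0 < xs.getD k 0 := by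
  intro k
  induction k with
  | zero => intro _ j hj; omega
  | succ k ih =>
    intro hk j hj hkp
    have hstep : xs.getD k 0 < xs.getD (k + 1) 0 := (h k hk).1 (by omega)
    rcases Nat.lt_or_ge j k with hjk | hjk
    · exact lt_trans (ih (by omega) j hjk (by omega)) hstep
    · have hje : j = k := by omega
      subst hje
      exact hstep

theorem down_chain (xs : List Int) (p : Nat) (h : Up xs p) :
    ∀ k, k < xs.length → ∀ j, j < k → p ≤ j → xs.getD k 0 < xs.getD j 0 := by
  intro k
  induction k with
  | zero => intro _ j hj; omega
  | succ k ih =>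
    intro hk j hj hpj
    have hstep : xs.getD (k + 1) 0 < xs.getD k 0 := (h k hk).2 (by omega)
    rcases Nat.lt_or_ge j k with hjk | hjk
    · exact lt_trans hstep (ih (by omega) j hjk hpj)
    · have hje : j = k := by omega
      subst hje
      exact hstep

theorem up_strict_max (xs : List Int) (p : Nat) (hp : p < xs.length) (h : Up xs p) :
    ∀ j, j < xs.length → j ≠ p → xs.getD j 0 < xs.getD p 0 := by
  intro j hj hne
  rcases Nat.lt_or_ge j p with hjp | hjp
  · exact up_chain xs p h p hp j hjp (le_refl p)
  · exact down_chain xs p h j hj p (by omega) (le_refl p)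

theorem firstIdxOfMax_up (xs : List Int) (p : Nat) (hp : p < xs.length) (h : Up xs p) :
    firstIdxOfMax xs = (p : Int) := by
  have hne : xs ≠ [] := by intro h0; rw [h0] at hp; simp at hp
  obtain ⟨m, hm⟩ : ∃ m, PySem.List.max? xs (fun x => x) = some m := by
    cases hx : PySem.List.max? xs (fun x => x) with
    | none => exact absurd ((PySem.List.max?_eq_none_iff xs _).mp hx) hne
    | some m => exact ⟨m, rfl⟩
  have hmx : m = xs.getD p 0 := by
    obtain ⟨j, hj, hxj⟩ := List.mem_iff_getElem.mp (PySem.List.max?_mem hm)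
    have hgd : xs.getD j 0 = m := by rw [List.getD_eq_getElem _ _ hj]; exact hxj
    by_cases hje : j = p
    · rw [← hgd, hje]
    · have h1 : xs.getD j 0 < xs.getD p 0 := up_strict_max xs p hp h j hj hje
      have hpm : xs.getD p 0 ∈ xs := by
        rw [List.getD_eq_getElem _ _ hp]; exact List.getElem_mem hp
      have h2 := PySem.List.max?_isMax hm (xs.getD p 0) hpm
      simp only at h2
      omega
  have hidx : PySem.List.index? xs (xs.getD p 0) = some p := by
    apply (PySem.List.index?_eq_some_iff xs _ p).mpr
    refine ⟨xs.take p, xs.drop (p + 1), ?_, by rw [List.length_take]; omega, ?_⟩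
    · conv_lhs => rw [← List.take_append_drop p xs]
      rw [List.drop_eq_getElem_cons hp, List.getD_eq_getElem _ _ hp]
    · intro hmem
      obtain ⟨j, hj, hxj⟩ := List.mem_iff_getElem.mp hmem
      have hjp : j < p := by
        have := hj; rw [List.length_take] at this; omega
      have hgd : xs.getD j 0 = xs.getD p 0 := by
        rw [List.getElem_take] at hxj
        rw [List.getD_eq_getElem _ _ (by omega : j < xs.length)]
        exact hxj
      have := up_chain xs p h p hp j hjp (le_refl p)
      omega
  unfold firstIdxOfMax
  simp only [hm, hmx, hidx]

theorem firstIdxOfMax_nat (xs : List Int) :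
    ∃ k : Nat, firstIdxOfMax xs = (k : Int) ∧ (k < xs.length ∨ k = 0) := by
  unfold firstIdxOfMax
  cases hm : PySem.List.max? xs (fun x => x) with
  | none => exact ⟨0, by simp, Or.inr rfl⟩
  | some m =>
    cases hi : PySem.List.index? xs m with
    | none => exact ⟨0, by simp only [hi]; simp, Or.inr rfl⟩
    | some i =>
      obtain ⟨hk, -, -⟩ := PySem.List.getElem_of_index?_eq_some hi
      exact ⟨i, by simp only [hi], Or.inl hk⟩

theorem B_iff (L : List Int) (h3 : ¬ L.length < 3) :
    solve_alt L = true ↔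
      ((∃ p, p ≤ L.length - 1 ∧ Up L p) ∨ (∃ p, p ≤ L.length - 1 ∧ Up (L.map fun x => -x) p)) := by
  have hnegl : (L.map fun x => -x).length = L.length := List.length_map ..
  unfold solve_alt
  rw [if_neg h3]
  simp only [Bool.or_eq_true]
  constructor
  · rintro (hM | hM)
    · obtain ⟨k, hk, hkb⟩ := firstIdxOfMax_nat L
      rw [hk] at hM
      have hkle : k ≤ L.length - 1 := by rcases hkb with hb | hb <;> omega
      exact Or.inl ⟨k, hkle, (isMountain_iff L k hkle (by omega)).mp hM⟩
    · obtain ⟨k, hk, hkb⟩ := firstIdxOfMax_nat (L.map fun x => -x)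
      rw [hk] at hM
      have hkle : k ≤ L.length - 1 := by rw [hnegl] at hkb; rcases hkb with hb | hb <;> omega
      refine Or.inr ⟨k, hkle, ?_⟩
      exact (isMountain_iff _ k (by rw [hnegl]; exact hkle) (by rw [hnegl]; omega)).mp hM
  · rintro (⟨p, hp, hup⟩ | ⟨p, hp, hup⟩)
    · refine Or.inl ?_
      rw [firstIdxOfMax_up L p (by omega) hup]
      exact (isMountain_iff L p hp (by omega)).mpr hup
    · refine Or.inr ?_
      rw [firstIdxOfMax_up (L.map fun x => -x) p (by rw [hnegl]; omega) hup]
      exact (isMountain_iff _ p (by rw [hnegl]; exact hp) (by rw [hnegl]; omega)).mpr hup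

-- ===== VERDICT (by name: the statement is the Claim_ definition above) =====
theorem solve_spec : Claim_equal_solve := by
  intro L _hdom
  unfold Spec_solve
  by_cases h3 : L.length < 3
  · unfold solve solve_alt
    rw [if_pos h3, if_pos h3]
  · rw [Bool.eq_iff_iff, A_iff L h3, B_iff L h3]
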